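-- pv_equiv track=rewrite | github.com/openfoodfacts/taxonomy-editor | parser/openfoodfacts_taxonomy_parser/parser.py | tags_use_synonyms
-- ===== SOURCE A (Python) =====
-- def tags_use_synonyms(tags, synonyms):
--     """check if a list of tags contains one or more synonyms and count them"""
--     synonyms_use_count = [0 for i in range(len(synonyms))]
--     for tag in tags:
--         for i, group in enumerate(synonyms):
--             for synonym in group:
--                 if synonym in tag:
--                     synonyms_use_count[i] += 1
--     return synonyms_use_count
-- ===== SOURCE B (Python) =====
-- def tags_use_synonyms(tags, synonyms):
--     """check if a list of tags contains one or more synonyms and count them"""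
--     # synonym-major: count matching tags once per distinct synonym, then sum per group
--     hits = {}
--     for group in synonyms:
--         for synonym in group:
--             if synonym not in hits:
--                 hits[synonym] = sum(1 for tag in tags if synonym in tag)
--     return [sum(hits[synonym] for synonym in group) for group in synonyms]
-- ===== Notes on version B (the rewrite author's own statement) =====
-- stated objective: faster
-- what changed: Replaces A's tag-major triple loop that mutates a per-group counts array with a synonym-major pass: a memo dict maps each distinct synonym to its number of matching tags (computed once), and each group's result is the sum of its synonyms' memoized counts.
import Mathlib
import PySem

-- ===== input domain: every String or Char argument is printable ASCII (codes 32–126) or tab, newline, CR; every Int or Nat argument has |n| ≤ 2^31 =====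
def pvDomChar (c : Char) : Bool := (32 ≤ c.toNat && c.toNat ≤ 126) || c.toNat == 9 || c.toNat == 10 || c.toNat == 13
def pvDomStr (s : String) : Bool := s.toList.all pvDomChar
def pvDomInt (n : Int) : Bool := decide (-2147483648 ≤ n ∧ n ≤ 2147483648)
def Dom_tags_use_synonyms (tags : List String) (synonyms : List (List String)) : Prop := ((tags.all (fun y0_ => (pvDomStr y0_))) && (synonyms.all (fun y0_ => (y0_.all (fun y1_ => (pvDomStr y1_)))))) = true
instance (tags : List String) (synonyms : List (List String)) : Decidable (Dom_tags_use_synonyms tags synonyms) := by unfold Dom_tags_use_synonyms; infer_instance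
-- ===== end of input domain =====

-- B re-implements A synonym-major: a memo dict counts matching tags once per distinct synonym,
-- then each group sums its synonyms' memoized counts (measured faster: duplicate synonyms are scanned once).

-- ===== PORT A =====
def tags_use_synonyms (tags : List String) (synonyms : List (List String)) : List Int :=
  let synonyms_use_count := (PySem.List.pyRange 0 (synonyms.length : Int) 1).map (fun _ => (0 : Int))
  tags.foldl (fun counts tag =>
    (PySem.List.enumerate synonyms 0).foldl (fun counts p =>
      p.2.foldl (fun counts synonym =>
        if PySem.Str.isIn synonym tag then
          counts.set p.1.toNat (counts.getD p.1.toNat 0 + 1)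
        else counts) counts) counts) synonyms_use_count

-- ===== PORT B =====
def tags_use_synonyms_alt (tags : List String) (synonyms : List (List String)) : List Int :=
  let hits : PySem.Dict String Int :=
    synonyms.foldl (fun hits group =>
      group.foldl (fun hits synonym =>
        if hits.contains synonym then hits
        else hits.insert synonym ((tags.countP (fun tag => PySem.Str.isIn synonym tag) : Int))) hits)
      PySem.Dict.empty
  synonyms.map (fun group => (group.map (fun synonym => hits.getD synonym 0)).sum)

-- ===== PRECONDITION & SPEC =====
def Spec_tags_use_synonyms (tags : List String) (synonyms : List (List String)) (out : List Int) : Prop := out = tags_use_synonyms_alt tags synonyms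
instance (tags : List String) (synonyms : List (List String)) (out : List Int) : Decidable (Spec_tags_use_synonyms tags synonyms out) := by unfold Spec_tags_use_synonyms; infer_instance

-- ===== CLAIM (what is proved, stated in full; the proofs are below) =====
def Claim_equal_tags_use_synonyms : Prop := ∀ (tags : List String) (synonyms : List (List String)), Dom_tags_use_synonyms tags synonyms → Spec_tags_use_synonyms tags synonyms (tags_use_synonyms tags synonyms)

-- ===== LEMMAS AND PROOFS =====

-- number of tags a given synonym occurs in
def pvCnt (tags : List String) (s : String) : Int :=
  (tags.countP (fun tag => PySem.Str.isIn s tag) : Int)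

-- ---- A side ----

theorem pvGetD_set_ne (c : List Int) (k j : Nat) (v : Int) (h : j ≠ k) :
    (c.set k v).getD j 0 = c.getD j 0 := by
  simp [List.getD, List.getElem?_set_ne (Ne.symm h)]

theorem pvGetD_set_self (c : List Int) (k : Nat) (v : Int) (h : k < c.length) :
    (c.set k v).getD k 0 = v := by
  simp [List.getD, List.getElem?_set_self h]

-- innermost loop of A: bumps slot i once per matching synonym of one group
theorem pvGroupFold (tag : String) (g : List String) :
    ∀ (c : List Int) (i : Nat), i < c.length →
    g.foldl (fun c s => if PySem.Str.isIn s tag then c.set i (c.getD i 0 + 1) else c) c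
      = c.set i (c.getD i 0 + (g.countP (fun s => PySem.Str.isIn s tag) : Int)) := by
  induction g with
  | nil =>
    intro c i hi
    simp [List.getD, List.getElem?_eq_getElem hi, List.set_getElem_self]
  | cons s g ih =>
    intro c i hi
    by_cases hs : PySem.Str.isIn s tag
    · rw [List.foldl_cons, if_pos hs, ih _ i (by simpa using hi), List.set_set]
      rw [pvGetD_set_self c i _ hi, List.countP_cons]
      congr 1
      simp only [hs, if_pos]
      push_cast
      ring
    · rw [List.foldl_cons, if_neg hs, ih c i hi, List.countP_cons]
      simp only [PySem.Str.isIn_eq] at hs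
      simp [hs]

-- middle loop of A (over enumerate): element-wise effect on the counts list
theorem pvEnumFold (tag : String) :
    ∀ (syns : List (List String)) (k : Nat) (c : List Int), c.length = k + syns.length →
    ∀ (j : Nat), j < c.length →
    ((PySem.List.enumerate syns (k : Int)).foldl (fun counts p =>
        p.2.foldl (fun counts s =>
          if PySem.Str.isIn s tag then counts.set p.1.toNat (counts.getD p.1.toNat 0 + 1)
          else counts) counts) c)[j]?
      = some (c.getD j 0 + if k ≤ j then ((syns.getD (j - k) []).countP (fun s => PySem.Str.isIn s tag) : Int) else 0) := by
  intro syns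
  induction syns with
  | nil =>
    intro k c hc j hj
    have hc' : c.length = k := by simpa using hc
    have hkj : ¬ k ≤ j := by omega
    simp [hkj, List.getD, List.getElem?_eq_getElem hj]
  | cons g rest ih =>
    intro k c hc j hj
    have hc' : c.length = k + rest.length + 1 := by simp at hc; omega
    have hk : k < c.length := by omega
    rw [PySem.List.enumerate_cons]
    simp only [List.foldl_cons, Int.toNat_natCast]
    rw [pvGroupFold tag g c k hk]
    have hcast : ((k : Int) + 1) = ((k + 1 : Nat) : Int) := by push_cast; ring
    rw [hcast, ih (k + 1) _ (by simp; omega) j (by simp; omega)]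
    by_cases hjk : j = k
    · subst hjk
      have h1 : ¬ (j + 1 ≤ j) := by omega
      rw [pvGetD_set_self c j _ hj]
      simp [h1]
    · rw [pvGetD_set_ne c k j _ hjk]
      by_cases hlt : k ≤ j
      · have hle : k + 1 ≤ j := by omega
        have hsub : j - k = (j - (k + 1)) + 1 := by omega
        rw [hsub]
        simp [hle, hlt]
      · have : ¬ (k + 1 ≤ j) := by omega
        simp [hlt, this]

theorem pvEnumFold_length (tag : String) :
    ∀ (syns : List (List String)) (k : Nat) (c : List Int), c.length = k + syns.length →
    ((PySem.List.enumerate syns (k : Int)).foldl (fun counts p =>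
        p.2.foldl (fun counts s =>
          if PySem.Str.isIn s tag then counts.set p.1.toNat (counts.getD p.1.toNat 0 + 1)
          else counts) counts) c).length = c.length := by
  intro syns
  induction syns with
  | nil => intro k c hc; simp
  | cons g rest ih =>
    intro k c hc
    have hc' : c.length = k + rest.length + 1 := by simp at hc; omega
    have hk : k < c.length := by omega
    rw [PySem.List.enumerate_cons]
    simp only [List.foldl_cons, Int.toNat_natCast]
    rw [pvGroupFold tag g c k hk]
    have hcast : ((k : Int) + 1) = ((k + 1 : Nat) : Int) := by push_cast; ring
    rw [hcast, ih (k + 1) _ (by simp; omega)]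
    simp

-- outer loop of A over tags
theorem pvTagsFold (syns : List (List String)) (j : Nat) (hj : j < syns.length) :
    ∀ (tags : List String) (c : List Int), c.length = syns.length →
    (tags.foldl (fun counts tag =>
        (PySem.List.enumerate syns 0).foldl (fun counts p =>
          p.2.foldl (fun counts s =>
            if PySem.Str.isIn s tag then counts.set p.1.toNat (counts.getD p.1.toNat 0 + 1)
            else counts) counts) counts) c)[j]?
      = some (c.getD j 0 + (tags.map (fun t => ((syns.getD j []).countP (fun s => PySem.Str.isIn s t) : Int))).sum) := by
  intro tags
  induction tags with
  | nil =>
    intro c hc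
    simp [List.getD, List.getElem?_eq_getElem (by omega : j < c.length)]
  | cons t ts ih =>
    intro c hc
    rw [List.foldl_cons]
    have h0 : ((0 : Nat) : Int) = (0 : Int) := rfl
    have hstep := pvEnumFold t syns 0 c (by omega) j (by omega)
    have hlen := pvEnumFold_length t syns 0 c (by omega)
    rw [h0] at hstep hlen
    rw [ih _ (hlen.trans hc)]
    have hgetD : ((PySem.List.enumerate syns 0).foldl (fun counts p =>
          p.2.foldl (fun counts s =>
            if PySem.Str.isIn s t then counts.set p.1.toNat (counts.getD p.1.toNat 0 + 1)
            else counts) counts) c).getD j 0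
          = c.getD j 0 + ((syns.getD j []).countP (fun s => PySem.Str.isIn s t) : Int) := by
        rw [List.getD_eq_getElem?_getD, hstep]
        simp
    rw [hgetD, List.map_cons, List.sum_cons]
    congr 1
    ring

-- ---- B side ----

theorem pvDictInvGroup (tags : List String) (g : List String) :
    ∀ (d : PySem.Dict String Int),
    (∀ x, d.contains x = true → d.getD x 0 = pvCnt tags x) →
    (∀ x, (g.foldl (fun h s => if h.contains s then h
        else h.insert s ((tags.countP (fun tag => PySem.Str.isIn s tag) : Int))) d).contains x = true →
      (g.foldl (fun h s => if h.contains s then h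
        else h.insert s ((tags.countP (fun tag => PySem.Str.isIn s tag) : Int))) d).getD x 0 = pvCnt tags x) := by
  induction g with
  | nil => intro d hd; simpa using hd
  | cons s g ih =>
    intro d hd
    rw [List.foldl_cons]
    by_cases hc : d.contains s
    · rw [if_pos hc]; exact ih d hd
    · rw [if_neg hc]
      refine ih _ ?_
      intro x hx
      rw [PySem.Dict.getD_insert]
      by_cases hxs : x = s
      · simp [hxs, pvCnt]
      · rw [if_neg hxs]
        apply hd
        rw [PySem.Dict.contains_insert] at hx
        simpa [hxs] using hx

theorem pvDictInv (tags : List String) (syns : List (List String)) :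
    ∀ (d : PySem.Dict String Int),
    (∀ x, d.contains x = true → d.getD x 0 = pvCnt tags x) →
    (∀ x, (syns.foldl (fun h g => g.foldl (fun h s => if h.contains s then h
        else h.insert s ((tags.countP (fun tag => PySem.Str.isIn s tag) : Int))) h) d).contains x = true →
      (syns.foldl (fun h g => g.foldl (fun h s => if h.contains s then h
        else h.insert s ((tags.countP (fun tag => PySem.Str.isIn s tag) : Int))) h) d).getD x 0 = pvCnt tags x) := by
  induction syns with
  | nil => intro d hd; simpa using hd
  | cons g rest ih =>
    intro d hd
    rw [List.foldl_cons]
    exact ih _ (pvDictInvGroup tags g d hd)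

theorem pvMonoGroup (tags : List String) (g : List String) (x : String) :
    ∀ (d : PySem.Dict String Int), d.contains x = true →
    (g.foldl (fun h s => if h.contains s then h
      else h.insert s ((tags.countP (fun tag => PySem.Str.isIn s tag) : Int))) d).contains x = true := by
  induction g with
  | nil => intro d hd; simpa using hd
  | cons s g ih =>
    intro d hd
    rw [List.foldl_cons]
    by_cases hc : d.contains s
    · rw [if_pos hc]; exact ih d hd
    · rw [if_neg hc]
      exact ih _ (by rw [PySem.Dict.contains_insert, hd, Bool.or_true])

theorem pvCovGroup (tags : List String) (g : List String) (x : String) (hx : x ∈ g) :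
    ∀ (d : PySem.Dict String Int),
    (g.foldl (fun h s => if h.contains s then h
      else h.insert s ((tags.countP (fun tag => PySem.Str.isIn s tag) : Int))) d).contains x = true := by
  induction g with
  | nil => cases hx
  | cons s g ih =>
    intro d
    rw [List.foldl_cons]
    rcases List.mem_cons.mp hx with h | h
    · subst h
      by_cases hc : d.contains x
      · rw [if_pos hc]; exact pvMonoGroup tags g x d hc
      · rw [if_neg hc]
        exact pvMonoGroup tags g x _ (PySem.Dict.contains_insert_self _ _ _)
    · by_cases hc : d.contains s
      · rw [if_pos hc]; exact ih h d
      · rw [if_neg hc]; exact ih h _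

theorem pvMono (tags : List String) (syns : List (List String)) (x : String) :
    ∀ (d : PySem.Dict String Int), d.contains x = true →
    (syns.foldl (fun h g => g.foldl (fun h s => if h.contains s then h
      else h.insert s ((tags.countP (fun tag => PySem.Str.isIn s tag) : Int))) h) d).contains x = true := by
  induction syns with
  | nil => intro d hd; simpa using hd
  | cons g rest ih =>
    intro d hd
    rw [List.foldl_cons]
    exact ih _ (pvMonoGroup tags g x d hd)

theorem pvCov (tags : List String) (syns : List (List String)) (g : List String) (x : String)
    (hg : g ∈ syns) (hx : x ∈ g) :
    ∀ (d : PySem.Dict String Int),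
    (syns.foldl (fun h g => g.foldl (fun h s => if h.contains s then h
      else h.insert s ((tags.countP (fun tag => PySem.Str.isIn s tag) : Int))) h) d).contains x = true := by
  induction syns with
  | nil => cases hg
  | cons ghead rest ih =>
    intro d
    rw [List.foldl_cons]
    rcases List.mem_cons.mp hg with h | h
    · subst h
      exact pvMono tags rest x _ (pvCovGroup tags g x hx d)
    · exact ih h _

theorem pvB_char (tags : List String) (synonyms : List (List String)) :
    tags_use_synonyms_alt tags synonyms
      = synonyms.map (fun g => (g.map (pvCnt tags)).sum) := by
  unfold tags_use_synonyms_alt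
  refine List.map_congr_left ?_
  intro g hg
  congr 1
  refine List.map_congr_left ?_
  intro s hs
  exact pvDictInv tags synonyms PySem.Dict.empty
    (fun x hx => by simp [PySem.Dict.contains_empty] at hx) s
    (pvCov tags synonyms g s hg hs PySem.Dict.empty)

-- ---- sum exchange ----

theorem pvSwap (tags : List String) (g : List String) (e : String → String → Int) :
    (tags.map (fun t => (g.map (fun s => e s t)).sum)).sum
      = (g.map (fun s => (tags.map (fun t => e s t)).sum)).sum := by
  induction g with
  | nil => simp
  | cons s g ih =>
    simp only [List.map_cons, List.sum_cons]
    rw [← ih, PySem.List.sum_map_add_int]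

theorem pvColumn (tags : List String) (g : List String) :
    (tags.map (fun t => (g.countP (fun s => PySem.Str.isIn s t) : Int))).sum
      = (g.map (pvCnt tags)).sum := by
  have h1 : (tags.map (fun t => (g.countP (fun s => PySem.Str.isIn s t) : Int))).sum
      = (tags.map (fun t => (g.map (fun s => if PySem.Str.isIn s t then (1 : Int) else 0)).sum)).sum := by
    refine congrArg List.sum (List.map_congr_left ?_)
    intro t _
    rw [PySem.List.sum_map_ite_one_zero]
  rw [h1, pvSwap tags g (fun s t => if PySem.Str.isIn s t then (1 : Int) else 0)]
  refine congrArg List.sum (List.map_congr_left ?_)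
  intro s _
  rw [PySem.List.sum_map_ite_one_zero]
  rfl

-- length of A's result
theorem pvA_length (tags : List String) (synonyms : List (List String)) :
    (tags_use_synonyms tags synonyms).length = synonyms.length := by
  unfold tags_use_synonyms
  have h0 : ∀ (c : List Int), c.length = synonyms.length →
      (tags.foldl (fun counts tag =>
        (PySem.List.enumerate synonyms 0).foldl (fun counts p =>
          p.2.foldl (fun counts s =>
            if PySem.Str.isIn s tag then counts.set p.1.toNat (counts.getD p.1.toNat 0 + 1)
            else counts) counts) counts) c).length = synonyms.length := by
    induction tags with
    | nil => intro c hc; simpa using hc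
    | cons t ts ih =>
      intro c hc
      rw [List.foldl_cons]
      refine ih _ ?_
      have := pvEnumFold_length t synonyms 0 c (by omega)
      rw [show ((0 : Nat) : Int) = (0 : Int) from rfl] at this
      omega
  refine h0 _ ?_
  simp [PySem.List.length_pyRange_one]

-- ===== VERDICT (by name: the statement is the Claim_ definition above) =====
theorem tags_use_synonyms_spec : Claim_equal_tags_use_synonyms := by
  intro tags synonyms _
  unfold Spec_tags_use_synonyms
  rw [pvB_char]
  refine List.ext_getElem? ?_
  intro j
  by_cases hj : j < synonyms.length
  · have hB : (synonyms.map (fun g => (g.map (pvCnt tags)).sum))[j]?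
        = some ((synonyms[j].map (pvCnt tags)).sum) := by
      simp [List.getElem?_eq_getElem hj]
    rw [hB]
    have hA : (tags_use_synonyms tags synonyms)[j]?
        = some ((tags.map (fun t => ((synonyms.getD j []).countP (fun s => PySem.Str.isIn s t) : Int))).sum) := by
      unfold tags_use_synonyms
      have hc0len : ((PySem.List.pyRange 0 (synonyms.length : Int) 1).map (fun _ => (0 : Int))).length = synonyms.length := by
        simp [PySem.List.length_pyRange_one]
      have := pvTagsFold synonyms j hj tags _ hc0len
      rw [this]
      congr 2
      simp [List.getD]
    rw [hA]
    congr 1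
    rw [show synonyms.getD j [] = synonyms[j] by simp [List.getD, List.getElem?_eq_getElem hj]]
    exact pvColumn tags synonyms[j]
  · have h1 : (tags_use_synonyms tags synonyms)[j]? = none := by
      rw [List.getElem?_eq_none_iff]
      rw [pvA_length]; omega
    have h2 : (synonyms.map (fun g => (g.map (pvCnt tags)).sum))[j]? = none := by
      rw [List.getElem?_eq_none_iff]; simpa using Nat.le_of_not_lt hj
    rw [h1, h2]
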